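-- pv_equiv track=rewrite | github.com/Alpha-Leporis/code | questions/HR/dominating_xor_pairs.py | dominating_xor_pairs
-- ===== SOURCE A (Python) =====
-- import math
--
-- def dominating_xor_pairs(arr):
--     n = len(arr)
--     count = 0
--     # for storing count of numbers
--     bits = [0] * 32
--     # itreating from 0 to n-1
--     for i in range(n):
--         val = int(math.log2(arr[i]))
--         count += bits[val]
--         bits[val] += 1
--
--     return n * (n-1) // 2 - count
-- ===== SOURCE B (Python) =====
-- import math
--
-- def dominating_xor_pairs(arr):
--     # sort the MSB indices, then one scan counts, for each element,
--     # the elements before its run (strictly smaller MSB) -> pairs with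
--     # differing MSB counted directly, no complement formula.
--     msbs = sorted(int(math.log2(x)) for x in arr)
--     prev = None
--     run = 0
--     seen = 0
--     diff = 0
--     for v in msbs:
--         if v == prev:
--             run += 1
--         else:
--             seen += run
--             run = 1
--             prev = v
--         diff += seen
--     return diff
-- ===== Notes on version B (the rewrite author's own statement) =====
-- stated objective: alternative
-- what changed: B sorts the MSB indices and counts differing-MSB pairs directly in one run-length scan over the sorted list, instead of A's fixed 32-slot histogram with the complement formula n*(n-1)//2 - same-pairs.
import Mathlib
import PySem

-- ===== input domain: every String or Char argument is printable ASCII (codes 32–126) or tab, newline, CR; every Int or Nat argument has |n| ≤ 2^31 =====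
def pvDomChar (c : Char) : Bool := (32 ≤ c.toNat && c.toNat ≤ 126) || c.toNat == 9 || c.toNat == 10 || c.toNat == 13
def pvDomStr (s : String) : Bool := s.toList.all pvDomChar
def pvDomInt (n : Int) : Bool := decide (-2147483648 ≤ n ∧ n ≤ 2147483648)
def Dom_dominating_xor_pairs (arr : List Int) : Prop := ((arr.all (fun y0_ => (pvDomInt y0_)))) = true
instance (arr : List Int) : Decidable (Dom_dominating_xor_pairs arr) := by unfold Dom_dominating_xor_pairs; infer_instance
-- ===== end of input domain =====

-- B sorts the MSB indices and counts differing-MSB pairs directly with one run-length scan,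
-- instead of A's fixed 32-slot histogram with the complement formula n*(n-1)//2 - count.

-- ===== PORT A =====
-- int(math.log2(x)) is ported as Nat.log2 x.toNat: exact for 1 ≤ x ≤ 2^31 (Dom ∧ Pre_),
-- where math.log2 of an int is the MSB index.  bits[val] is ported with getD/set: under
-- Dom the index is < 32, so in range (out of range Python raises IndexError, outside Dom).
def pvStepA (st : Int × List Int) (x : Int) : Int × List Int :=
  let val := Nat.log2 x.toNat
  let c := st.2.getD val 0
  (st.1 + c, st.2.set val (c + 1))

def dominating_xor_pairs (arr : List Int) : Int :=
  let n : Int := arr.length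
  let st := arr.foldl pvStepA ((0 : Int), List.replicate 32 (0 : Int))
  PySem.Int.floordiv (n * (n - 1)) 2 - st.1

-- ===== PORT B =====
-- the loop body: if v == prev: run += 1 else: seen += run; run = 1; prev = v;  diff += seen
def pvStepB (st : Option Int × Int × Int × Int) (v : Int) : Option Int × Int × Int × Int :=
  match st with
  | (prev, run, seen, diff) =>
    if some v = prev then (prev, run + 1, seen, diff + seen)
    else (some v, 1, seen + run, diff + (seen + run))

def dominating_xor_pairs_alt (arr : List Int) : Int :=
  let msbs := PySem.List.sorted (arr.map (fun x => ((Nat.log2 x.toNat : Nat) : Int))) (fun v => v)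
  (msbs.foldl pvStepB ((none : Option Int), (0 : Int), (0 : Int), (0 : Int))).2.2.2

-- ===== PRECONDITION & SPEC =====
-- Pre_ excludes non-positive elements, on which Python's math.log2 raises ValueError in both A and B.
def Pre_dominating_xor_pairs (arr : List Int) : Prop := ∀ x ∈ arr, 0 < x
instance (arr : List Int) : Decidable (Pre_dominating_xor_pairs arr) := by unfold Pre_dominating_xor_pairs; infer_instance
def pvWitness_dominating_xor_pairs : List Int := [1, 2, 3, 7]
def Spec_dominating_xor_pairs (arr : List Int) (out : Int) : Prop := out = dominating_xor_pairs_alt arr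
instance (arr : List Int) (out : Int) : Decidable (Spec_dominating_xor_pairs arr out) := by unfold Spec_dominating_xor_pairs; infer_instance

-- ===== CLAIM (what is proved, stated in full; the proofs are below) =====
def Claim_equal_dominating_xor_pairs : Prop := ∀ (arr : List Int), Dom_dominating_xor_pairs arr → Pre_dominating_xor_pairs arr → Spec_dominating_xor_pairs arr (dominating_xor_pairs arr)

-- ===== LEMMAS AND PROOFS =====

-- number of pairs i < j with equal / different values
def pvSame : List Int → Int
  | [] => 0
  | x :: t => (t.count x : Int) + pvSame t

def pvDiff : List Int → Int
  | [] => 0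
  | x :: t => ((t.length : Int) - (t.count x : Int)) + pvDiff t

def pvC2 (c : Int) : Int := PySem.Int.floordiv (c * (c - 1)) 2

theorem pv_fdiv2 (k : Int) : PySem.Int.floordiv (2 * k) 2 = k := by
  rw [PySem.Int.floordiv_eq_iff_of_pos (by norm_num)]
  omega

theorem pvC2_step (c : Int) : pvC2 (c + 1) = pvC2 c + c := by
  obtain ⟨k, hk⟩ := Int.even_mul_succ_self (c - 1)
  have h1 : c * (c - 1) = 2 * k := by linear_combination hk
  have h2 : (c + 1) * (c + 1 - 1) = 2 * (k + c) := by linear_combination hk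
  unfold pvC2
  rw [h1, h2, pv_fdiv2, pv_fdiv2]

theorem pvSame_add_pvDiff (m : List Int) : pvSame m + pvDiff m = pvC2 m.length := by
  induction m with
  | nil => simp [pvSame, pvDiff, pvC2, PySem.Int.floordiv]
  | cons x t ih =>
    simp only [pvSame, pvDiff, List.length_cons]
    have : ((t.length + 1 : Nat) : Int) = (t.length : Int) + 1 := by push_cast; ring
    rw [this, pvC2_step, ← ih]
    have hc : (t.count x : Int) ≤ (t.length : Int) := by
      exact_mod_cast List.count_le_length
    ring

theorem pvSame_perm {xs ys : List Int} (h : xs.Perm ys) : pvSame xs = pvSame ys := by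
  induction h with
  | nil => rfl
  | cons x h ih =>
    simp only [pvSame, ih, h.count_eq]
  | swap x y l =>
    simp only [pvSame, List.count_cons, beq_iff_eq]
    by_cases hxy : x = y
    · subst hxy; ring
    · simp only [if_neg hxy, if_neg (Ne.symm hxy)]; push_cast; ring
  | trans h1 h2 ih1 ih2 => rw [ih1, ih2]

theorem pvSame_snoc (P : List Int) (a : Int) : pvSame (P ++ [a]) = pvSame P + (P.count a : Int) := by
  induction P with
  | nil => simp [pvSame]
  | cons x t ih =>
    simp only [List.cons_append, pvSame, ih, List.count_append, List.count_cons,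
      List.count_nil, beq_iff_eq]
    by_cases hax : a = x
    · subst hax
      push_cast; ring
    · rw [if_neg (fun h => hax (Eq.symm h)), if_neg hax]
      push_cast; ring

theorem pv_getD_set (l : List Int) (i v : Nat) (a : Int) (hi : i < l.length) :
    (l.set i a).getD v 0 = if v = i then a else l.getD v 0 := by
  induction l generalizing i v with
  | nil => simp at hi
  | cons x t ih =>
    cases i with
    | zero => cases v <;> simp
    | succ j =>
      cases v with
      | zero => simp
      | succ w =>
        simp only [List.set, List.getD_cons_succ]
        rw [ih j w (by simpa using hi)]
        simp

theorem pv_loopA (l : List Int) (P : List Int) (count : Int) (bits : List Int)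
    (hlen : bits.length = 32)
    (hv : ∀ x ∈ l, Nat.log2 x.toNat < 32)
    (hb : ∀ v : Nat, v < 32 → bits.getD v 0 = ((P.count ((v : Nat) : Int)) : Int)) :
    (l.foldl pvStepA (count, bits)).1
      = count + pvSame (P ++ l.map (fun x => ((Nat.log2 x.toNat : Nat) : Int))) - pvSame P := by
  induction l generalizing P count bits with
  | nil => simp
  | cons x t ih =>
    simp only [List.foldl_cons, List.map_cons]
    have hx : Nat.log2 x.toNat < 32 := hv x (by simp)
    set mx := Nat.log2 x.toNat with hmx
    have hstep : pvStepA (count, bits) x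
        = (count + (P.count ((mx : Nat) : Int) : Int),
           bits.set mx (bits.getD mx 0 + 1)) := by
      simp only [pvStepA, ← hmx]
      rw [hb mx hx]
    rw [hstep]
    have hlen' : (bits.set mx (bits.getD mx 0 + 1)).length = 32 := by simp [hlen]
    have hb' : ∀ v : Nat, v < 32 →
        (bits.set mx (bits.getD mx 0 + 1)).getD v 0
          = (((P ++ [((mx : Nat) : Int)]).count ((v : Nat) : Int)) : Int) := by
      intro v hv32
      rw [pv_getD_set bits mx v _ (by omega), List.count_append]
      by_cases hvm : v = mx
      · rw [if_pos hvm, hvm]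
        have h1 : ([((mx : Nat) : Int)].count ((mx : Nat) : Int)) = 1 := by simp
        rw [h1, hb mx hx]; push_cast; ring
      · rw [if_neg hvm, hb v hv32]
        have h1 : ([((mx : Nat) : Int)].count ((v : Nat) : Int)) = 0 := by
          rw [List.count_eq_zero, List.mem_singleton]
          exact fun h => hvm (by exact_mod_cast h)
        rw [h1]; push_cast; ring
    have := ih (P ++ [((mx : Nat) : Int)]) (count + (P.count ((mx : Nat) : Int) : Int))
        (bits.set mx (bits.getD mx 0 + 1)) hlen' (fun y hy => hv y (by simp [hy])) hb'
    rw [this, pvSame_snoc]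
    have hassoc : P ++ [((mx : Nat) : Int)] ++ t.map (fun x => ((Nat.log2 x.toNat : Nat) : Int))
        = P ++ ((mx : Nat) : Int) :: t.map (fun x => ((Nat.log2 x.toNat : Nat) : Int)) := by
      simp
    rw [hassoc]
    ring

theorem pv_count_eq_zero_of_forall_lt (pv : Int) (t : List Int) (h : ∀ v ∈ t, pv < v) :
    t.count pv = 0 := by
  rw [List.count_eq_zero]
  intro hmem
  exact absurd rfl (ne_of_gt (h pv hmem))

theorem pv_loopB (s : List Int) (pv run seen diff : Int)
    (hs : s.Pairwise (· ≤ ·)) (hlow : ∀ v ∈ s, pv ≤ v) :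
    (s.foldl pvStepB (some pv, run, seen, diff)).2.2.2
      = diff + seen * s.length + run * ((s.length : Int) - (s.count pv : Int)) + pvDiff s := by
  induction s generalizing pv run seen diff with
  | nil => simp [pvDiff]
  | cons w t ih =>
    have hwt : ∀ v ∈ t, w ≤ v := by
      intro v hv; exact (List.pairwise_cons.mp hs).1 v hv
    have ht : t.Pairwise (· ≤ ·) := (List.pairwise_cons.mp hs).2
    simp only [List.foldl_cons]
    by_cases hwpv : w = pv
    · subst hwpv
      have hstep : pvStepB (some w, run, seen, diff) w = (some w, run + 1, seen, diff + seen) := by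
        simp [pvStepB]
      rw [hstep, ih w (run + 1) seen (diff + seen) ht hwt]
      simp only [List.length_cons, List.count_cons_self, pvDiff]
      push_cast
      ring
    · have hlt : pv < w := lt_of_le_of_ne (hlow w (by simp)) (Ne.symm hwpv)
      have hstep : pvStepB (some pv, run, seen, diff) w
          = (some w, 1, seen + run, diff + (seen + run)) := by
        simp [pvStepB, hwpv]
      rw [hstep, ih w 1 (seen + run) (diff + (seen + run)) ht hwt]
      have hcnt : t.count pv = 0 :=
        pv_count_eq_zero_of_forall_lt pv t (fun v hv => lt_of_lt_of_le hlt (hwt v hv))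
      have hcnt' : (w :: t).count pv = 0 := by
        simp [hcnt, hwpv]
      rw [hcnt']
      simp only [List.length_cons, pvDiff]
      push_cast
      ring

theorem pv_loopB_start (s : List Int) (hs : s.Pairwise (· ≤ ·)) :
    (s.foldl pvStepB ((none : Option Int), (0 : Int), (0 : Int), (0 : Int))).2.2.2 = pvDiff s := by
  cases s with
  | nil => simp [pvDiff]
  | cons w t =>
    have hwt : ∀ v ∈ t, w ≤ v := by
      intro v hv; exact (List.pairwise_cons.mp hs).1 v hv
    have ht : t.Pairwise (· ≤ ·) := (List.pairwise_cons.mp hs).2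
    simp only [List.foldl_cons]
    have hstep : pvStepB ((none : Option Int), (0 : Int), (0 : Int), (0 : Int)) w
        = (some w, 1, 0, 0) := by
      simp [pvStepB]
    rw [hstep, pv_loopB t w 1 0 0 ht hwt]
    simp [pvDiff]

-- ===== VERDICT (by name: the statement is the Claim_ definition above) =====
theorem dominating_xor_pairs_spec : Claim_equal_dominating_xor_pairs := by
  intro arr hdom _hpre
  unfold Spec_dominating_xor_pairs
  have hv : ∀ x ∈ arr, Nat.log2 x.toNat < 32 := by
    intro x hx
    have hd : pvDomInt x = true := by
      unfold Dom_dominating_xor_pairs at hdom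
      exact (List.all_eq_true.mp hdom) x hx
    have hle : x ≤ 2147483648 := by
      simp [pvDomInt] at hd; omega
    have hlt : x.toNat < 2 ^ 32 := by omega
    by_cases h0 : x.toNat = 0
    · simp [h0, Nat.log2]
    · exact (Nat.log2_lt h0).mpr hlt
  have hA := pv_loopA arr [] 0 (List.replicate 32 (0 : Int)) (by simp) hv
      (by
        intro v hv32
        rw [List.getD_eq_getElem?_getD, List.getElem?_replicate]
        simp [hv32])
  simp only [List.nil_append] at hA
  have hperm : (PySem.List.sorted (arr.map (fun x => ((Nat.log2 x.toNat : Nat) : Int))) (fun v => v)).Perm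
      (arr.map (fun x => ((Nat.log2 x.toNat : Nat) : Int))) :=
    PySem.List.sorted_perm _ _ false
  have hpair : (PySem.List.sorted (arr.map (fun x => ((Nat.log2 x.toNat : Nat) : Int))) (fun v => v)).Pairwise (· ≤ ·) :=
    PySem.List.sorted_pairwise _ _
  have hAval : dominating_xor_pairs arr
      = pvC2 (arr.length : Int) - pvSame (arr.map (fun x => ((Nat.log2 x.toNat : Nat) : Int))) := by
    unfold dominating_xor_pairs
    show PySem.Int.floordiv ((arr.length : Int) * ((arr.length : Int) - 1)) 2
        - (arr.foldl pvStepA ((0 : Int), List.replicate 32 (0 : Int))).1 = _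
    rw [hA]
    simp only [pvSame]
    unfold pvC2
    ring
  have hBval : dominating_xor_pairs_alt arr
      = pvDiff (PySem.List.sorted (arr.map (fun x => ((Nat.log2 x.toNat : Nat) : Int))) (fun v => v)) := by
    unfold dominating_xor_pairs_alt
    show ((PySem.List.sorted (arr.map (fun x => ((Nat.log2 x.toNat : Nat) : Int))) (fun v => v)).foldl
        pvStepB ((none : Option Int), (0 : Int), (0 : Int), (0 : Int))).2.2.2 = _
    exact pv_loopB_start _ hpair
  rw [hAval, hBval]
  have hsum := pvSame_add_pvDiff
    (PySem.List.sorted (arr.map (fun x => ((Nat.log2 x.toNat : Nat) : Int))) (fun v => v))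
  have hsame : pvSame (PySem.List.sorted (arr.map (fun x => ((Nat.log2 x.toNat : Nat) : Int))) (fun v => v))
      = pvSame (arr.map (fun x => ((Nat.log2 x.toNat : Nat) : Int))) := pvSame_perm hperm
  have hlen : (PySem.List.sorted (arr.map (fun x => ((Nat.log2 x.toNat : Nat) : Int))) (fun v => v)).length
      = arr.length := by rw [hperm.length_eq, List.length_map]
  rw [hlen, hsame] at hsum
  linarith
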